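-- pv_equiv track=rewrite | github.com/arindam89/PythonDataStructures | src/leetcode/core/matrix_dfs.py | matrix_dfs
-- ===== SOURCE A (Python) =====
-- def matrix_dfs(matrix):
--     """Perform DFS on a 2D matrix and return the visited nodes."""
--     rows, cols = len(matrix), len(matrix[0])
--     visited = [[False for _ in range(cols)] for _ in range(rows)]
--
--     def dfs(r, c):
--         if r < 0 or c < 0 or r >= rows or c >= cols or visited[r][c] or matrix[r][c] == 0:
--             return
--         visited[r][c] = True
--         dfs(r + 1, c)
--         dfs(r - 1, c)
--         dfs(r, c + 1)
--         dfs(r, c - 1)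
--
--     for r in range(rows):
--         for c in range(cols):
--             if matrix[r][c] == 1 and not visited[r][c]:
--                 dfs(r, c)
--
--     return visited
-- ===== SOURCE B (Python) =====
-- def matrix_dfs(matrix):
--     """Perform DFS on a 2D matrix and return the visited nodes."""
--     rows, cols = len(matrix), len(matrix[0])
--     visited = [[matrix[r][c] == 1 for c in range(cols)] for r in range(rows)]
--     changed = True
--     while changed:
--         changed = False
--         for r in range(rows):
--             for c in range(cols):
--                 if not visited[r][c] and matrix[r][c] != 0 and (
--                         (r > 0 and visited[r - 1][c])
--                         or (r + 1 < rows and visited[r + 1][c])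
--                         or (c > 0 and visited[r][c - 1])
--                         or (c + 1 < cols and visited[r][c + 1])):
--                     visited[r][c] = True
--                     changed = True
--     return visited
-- ===== Notes on version B (the rewrite author's own statement) =====
-- stated objective: alternative
-- what changed: Replaced the recursive seeded DFS by an iterative fixpoint propagation: start from all 1-cells and repeatedly sweep the grid marking any nonzero cell adjacent to a marked cell until a sweep changes nothing.
import Mathlib
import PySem

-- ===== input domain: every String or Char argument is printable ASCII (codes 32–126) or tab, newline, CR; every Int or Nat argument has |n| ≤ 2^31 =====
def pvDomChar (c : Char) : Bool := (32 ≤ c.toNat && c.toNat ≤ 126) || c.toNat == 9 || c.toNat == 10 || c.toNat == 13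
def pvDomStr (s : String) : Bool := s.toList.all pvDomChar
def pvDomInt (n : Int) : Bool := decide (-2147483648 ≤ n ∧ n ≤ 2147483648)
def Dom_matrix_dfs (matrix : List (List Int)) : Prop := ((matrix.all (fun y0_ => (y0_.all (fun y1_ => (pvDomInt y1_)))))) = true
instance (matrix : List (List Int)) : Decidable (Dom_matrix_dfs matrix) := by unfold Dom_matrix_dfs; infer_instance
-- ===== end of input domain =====

-- B replaces A's recursive seeded DFS by an iterative fixpoint propagation (start from the
-- 1-cells, sweep the grid marking nonzero cells adjacent to marked cells until no change);
-- equal return value on Pre_ (both compute the cells connected to a 1-cell through nonzero cells).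

-- ===== PORT A =====
-- grid primitives: visited[r][c] read, visited[r][c] = True, matrix[r][c] read
-- (used in-bounds only, behind the bounds guards both Python versions carry)
def vget (v : List (List Bool)) (r c : Int) : Bool :=
  (v.getD r.toNat []).getD c.toNat false

def vset (v : List (List Bool)) (r c : Int) : List (List Bool) :=
  v.set r.toNat ((v.getD r.toNat []).set c.toNat true)

def mget (m : List (List Int)) (r c : Int) : Int :=
  (m.getD r.toNat []).getD c.toNat 0

-- A's guard line `r < 0 or c < 0 or r >= rows or c >= cols or visited[r][c] or matrix[r][c] == 0`
def dfsGuard (m : List (List Int)) (rows cols : Int) (v : List (List Bool)) (r c : Int) : Bool :=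
  decide (r < 0) || decide (c < 0) || decide (rows ≤ r) || decide (cols ≤ c) || vget v r c || decide (mget m r c = 0)

-- A's recursive helper `dfs(r, c)`; fuel bounds the recursion depth (each non-returning
-- level marks a fresh cell, so `rows*cols + 1` fuel is exact; proved below)
def dfsA (m : List (List Int)) (rows cols : Int) : Nat → List (List Bool) → Int → Int → List (List Bool)
  | 0, v, _, _ => v
  | fuel + 1, v, r, c =>
    if dfsGuard m rows cols v r c then v
    else
      let v1 := vset v r c
      let v2 := dfsA m rows cols fuel v1 (r + 1) c
      let v3 := dfsA m rows cols fuel v2 (r - 1) c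
      let v4 := dfsA m rows cols fuel v3 r (c + 1)
      dfsA m rows cols fuel v4 r (c - 1)

def matrix_dfs (matrix : List (List Int)) : List (List Bool) :=
  let rows : Int := matrix.length
  let cols : Int := (matrix.headD []).length
  let visited := List.replicate matrix.length (List.replicate (matrix.headD []).length false)
  (List.range matrix.length).foldl (fun v (r : Nat) =>
    (List.range (matrix.headD []).length).foldl (fun v (c : Nat) =>
      if mget matrix (r : Int) (c : Int) == 1 && !vget v (r : Int) (c : Int) then
        dfsA matrix rows cols (matrix.length * (matrix.headD []).length + 1) v (r : Int) (c : Int)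
      else v) v) visited

-- ===== PORT B =====
-- B's initial grid: `[[matrix[r][c] == 1 for c in range(cols)] for r in range(rows)]`
def initB (m : List (List Int)) : List (List Bool) :=
  (List.range m.length).map (fun (r : Nat) =>
    (List.range (m.headD []).length).map (fun (c : Nat) => mget m (r : Int) (c : Int) == 1))

-- B's neighbour test `(r > 0 and visited[r-1][c]) or (r+1 < rows and visited[r+1][c]) or …`
def nbr (rows cols : Int) (v : List (List Bool)) (r c : Int) : Bool :=
  (decide (0 < r) && vget v (r - 1) c) || (decide (r + 1 < rows) && vget v (r + 1) c) ||
    (decide (0 < c) && vget v r (c - 1)) || (decide (c + 1 < cols) && vget v r (c + 1))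

-- B's loop body for one cell: mark it (and raise the changed flag) if unvisited, nonzero
-- and next to a visited cell
def sweepCell (m : List (List Int)) (rows cols : Int)
    (st : List (List Bool) × Bool) (rc : Int × Int) : List (List Bool) × Bool :=
  if !vget st.1 rc.1 rc.2 && decide (mget m rc.1 rc.2 ≠ 0) && nbr rows cols st.1 rc.1 rc.2 then
    (vset st.1 rc.1 rc.2, true)
  else st

-- one full pass `for r in range(rows): for c in range(cols): …` over (grid, changed)
def sweep (m : List (List Int)) (rows cols : Int)
    (st : List (List Bool) × Bool) : List (List Bool) × Bool :=
  (List.range m.length).foldl (fun st (r : Nat) =>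
    (List.range (m.headD []).length).foldl (fun st (c : Nat) =>
      sweepCell m rows cols st ((r : Int), (c : Int))) st) st

-- B's `while changed:` loop; fuel bounds the number of passes (every pass that sets the
-- flag marks at least one fresh cell, so `rows*cols + 1` passes suffice; proved below)
def loopB (m : List (List Int)) (rows cols : Int) : Nat → List (List Bool) → List (List Bool)
  | 0, v => v
  | fuel + 1, v =>
    let s := sweep m rows cols (v, false)
    if s.2 then loopB m rows cols fuel s.1 else s.1

def matrix_dfs_alt (matrix : List (List Int)) : List (List Bool) :=
  let rows : Int := matrix.length
  let cols : Int := (matrix.headD []).length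
  loopB matrix rows cols (matrix.length * (matrix.headD []).length + 1) (initB matrix)

-- ===== PRECONDITION & SPEC =====
-- Pre_ excludes exactly the inputs on which the Python A raises IndexError: the empty
-- matrix (matrix[0]) and matrices with a row shorter than row 0 (matrix[r][c], c < cols).
def Pre_matrix_dfs (matrix : List (List Int)) : Prop :=
  matrix ≠ [] ∧ ∀ row ∈ matrix, (matrix.headD []).length ≤ row.length

instance (matrix : List (List Int)) : Decidable (Pre_matrix_dfs matrix) := by
  unfold Pre_matrix_dfs; infer_instance

def pvWitness_matrix_dfs : List (List Int) := [[1, 0, 2], [0, 1, 1], [1, 0, 0]]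

def Spec_matrix_dfs (matrix : List (List Int)) (out : List (List Bool)) : Prop := out = matrix_dfs_alt matrix
instance (matrix : List (List Int)) (out : List (List Bool)) : Decidable (Spec_matrix_dfs matrix out) := by unfold Spec_matrix_dfs; infer_instance

-- ===== CLAIM (what is proved, stated in full; the proofs are below) =====
def Claim_equal_matrix_dfs : Prop := ∀ (matrix : List (List Int)), Dom_matrix_dfs matrix → Pre_matrix_dfs matrix → Spec_matrix_dfs matrix (matrix_dfs matrix)

-- ===== LEMMAS AND PROOFS =====

-- shape invariant: visited always has matrix.length rows of matrix[0].length cells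
def Shape (m : List (List Int)) (v : List (List Bool)) : Prop :=
  v.length = m.length ∧ ∀ row ∈ v, row.length = (m.headD []).length

-- number of unvisited cells (the termination/fuel measure)
def ucount (v : List (List Bool)) : Nat :=
  (v.map (fun row => row.countP (fun b => !b))).sum

def Adj (r c r' c' : Int) : Prop :=
  (r' = r + 1 ∧ c' = c) ∨ (r' = r - 1 ∧ c' = c) ∨ (r' = r ∧ c' = c + 1) ∨ (r' = r ∧ c' = c - 1)

-- reachability from (r,c) through guard-passing cells (avoiding cells visited in v)
inductive Reach (m : List (List Int)) (rows cols : Int) (v : List (List Bool)) : Int → Int → Int → Int → Prop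
  | refl (r c : Int) : dfsGuard m rows cols v r c = false → Reach m rows cols v r c r c
  | step (r c r' c' x y : Int) : dfsGuard m rows cols v r c = false → Adj r c r' c' →
      Reach m rows cols v r' c' x y → Reach m rows cols v r c x y

-- A's initial all-False visited grid
def vinitL (m : List (List Int)) : List (List Bool) :=
  List.replicate m.length (List.replicate (m.headD []).length false)

-- reachability through nonzero in-bounds cells (visited = the initial all-False grid)
def Reach0 (m : List (List Int)) : Int → Int → Int → Int → Prop :=
  Reach m (m.length : Int) ((m.headD []).length : Int) (vinitL m)

-- the set both programs compute: cells reachable from a 1-cell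
def SReach (m : List (List Int)) (x y : Int) : Prop :=
  ∃ p q : Int, mget m p q = 1 ∧ Reach0 m p q x y

def MSub (m : List (List Int)) (v : List (List Bool)) : Prop :=
  ∀ x y : Int, 0 ≤ x → 0 ≤ y → vget v x y = true → SReach m x y

def Closed (m : List (List Int)) (g : List (List Bool)) : Prop :=
  ∀ r c : Int, 0 ≤ r → r < (m.length : Int) → 0 ≤ c → c < ((m.headD []).length : Int) →
    mget m r c ≠ 0 → nbr (m.length : Int) ((m.headD []).length : Int) g r c = true →
    vget g r c = true

def cellList (m : List (List Int)) : List (Int × Int) :=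
  (List.range m.length).flatMap (fun (r : Nat) =>
    (List.range (m.headD []).length).map (fun (c : Nat) => ((r : Int), (c : Int))))

def QL (m : List (List Int)) (L : List (Int × Int)) (x y : Int) : Prop :=
  ∃ rc ∈ L, mget m rc.1 rc.2 = 1 ∧ Reach0 m rc.1 rc.2 x y

lemma guard_false_iff (m : List (List Int)) (rows cols : Int) (v : List (List Bool)) (r c : Int) :
    dfsGuard m rows cols v r c = false ↔
      0 ≤ r ∧ r < rows ∧ 0 ≤ c ∧ c < cols ∧ vget v r c = false ∧ mget m r c ≠ 0 := by
  simp [dfsGuard, not_lt, Bool.or_eq_false_iff, decide_eq_false_iff_not]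
  tauto

lemma vget_natCast (v : List (List Bool)) (i j : Nat) :
    vget v (i : Int) (j : Int) = (v.getD i []).getD j false := by
  simp [vget]

lemma vset_oob (v : List (List Bool)) (r c : Int)
    (h : ¬(r.toNat < v.length ∧ c.toNat < (v.getD r.toNat []).length)) : vset v r c = v := by
  by_cases hr : r.toNat < v.length
  · have hc : (v.getD r.toNat []).length ≤ c.toNat := by omega
    unfold vset
    rw [List.getD_eq_getElem _ _ hr] at hc ⊢
    rw [List.set_eq_of_length_le hc, List.set_getElem_self hr]
  · unfold vset
    exact List.set_eq_of_length_le (by omega)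

lemma vset_shape (m : List (List Int)) (v : List (List Bool)) (r c : Int)
    (h : Shape m v) : Shape m (vset v r c) := by
  by_cases hb : r.toNat < v.length ∧ c.toNat < (v.getD r.toNat []).length
  · obtain ⟨h1, h2⟩ := h
    refine ⟨by simp [vset, h1], ?_⟩
    intro row hrow
    rcases List.mem_or_eq_of_mem_set hrow with hm | he
    · exact h2 _ hm
    · subst he
      rw [List.length_set]
      apply h2
      rw [List.getD_eq_getElem _ _ hb.1]
      exact List.getElem_mem _
  · rw [vset_oob _ _ _ hb]; exact h

lemma getD_set_self {α} (l : List α) (i : Nat) (a d : α) (h : i < l.length) :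
    (l.set i a).getD i d = a := by
  rw [List.getD_eq_getElem?_getD, List.getElem?_set_self h, Option.getD_some]

lemma getD_set_ne {α} (l : List α) (i j : Nat) (a d : α) (h : i ≠ j) :
    (l.set i a).getD j d = l.getD j d := by
  rw [List.getD_eq_getElem?_getD, List.getElem?_set_ne h, ← List.getD_eq_getElem?_getD]

lemma vget_vset (v : List (List Bool)) (r c : Int)
    (hr : r.toNat < v.length) (hc : c.toNat < (v.getD r.toNat []).length) (x y : Int) :
    vget (vset v r c) x y =
      if x.toNat = r.toNat ∧ y.toNat = c.toNat then true else vget v x y := by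
  unfold vget vset
  by_cases hx : x.toNat = r.toNat
  · rw [hx, getD_set_self _ _ _ _ hr]
    by_cases hy : y.toNat = c.toNat
    · rw [hy, getD_set_self _ _ _ _ hc]
      simp [hx, hy]
    · rw [getD_set_ne _ _ _ _ _ (fun e => hy e.symm)]
      simp [hx, hy]
  · rw [getD_set_ne _ _ _ _ _ (fun e => hx e.symm)]
    simp [hx]

lemma vset_mono (v : List (List Bool)) (r c x y : Int) (h : vget v x y = true) :
    vget (vset v r c) x y = true := by
  by_cases hb : r.toNat < v.length ∧ c.toNat < (v.getD r.toNat []).length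
  · rw [vget_vset v r c hb.1 hb.2 x y]
    split
    · rfl
    · exact h
  · rw [vset_oob _ _ _ hb]; exact h

lemma countP_set_le (row : List Bool) : ∀ (j : Nat),
    (row.set j true).countP (fun b => !b) ≤ row.countP (fun b => !b) := by
  induction row with
  | nil => intro j; simp
  | cons b t ih =>
    intro j
    cases j with
    | zero => cases b <;> simp [List.countP_cons]
    | succ j => simp [List.countP_cons]; have := ih j; omega

lemma countP_set_lt (row : List Bool) : ∀ (j : Nat), j < row.length →
    row.getD j false = false →
    (row.set j true).countP (fun b => !b) < row.countP (fun b => !b) := by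
  induction row with
  | nil => intro j h; simp at h
  | cons b t ih =>
    intro j hj hg
    cases j with
    | zero =>
      simp at hg
      subst hg
      simp [List.countP_cons]
    | succ j =>
      simp at hj hg
      have := ih j hj (by simpa [List.getD] using hg)
      simp [List.countP_cons]
      omega

lemma ucount_vset_le (v : List (List Bool)) (r c : Int) : ucount (vset v r c) ≤ ucount v := by
  unfold ucount vset
  induction v generalizing r with
  | nil => simp
  | cons row t ih =>
    by_cases hr : r.toNat = 0
    · simp [hr, List.getD]
      exact countP_set_le row c.toNat
    · obtain ⟨n, hn⟩ : ∃ n, r.toNat = n + 1 := ⟨r.toNat - 1, by omega⟩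
      have := ih (n : Int)
      simp [hn, List.getD] at this ⊢
      exact this

lemma ucount_vset_lt (v : List (List Bool)) (r c : Int)
    (hr : r.toNat < v.length) (hc : c.toNat < (v.getD r.toNat []).length)
    (h : vget v r c = false) : ucount (vset v r c) < ucount v := by
  unfold ucount vset
  unfold vget at h
  induction v generalizing r with
  | nil => simp at hr
  | cons row t ih =>
    by_cases hr0 : r.toNat = 0
    · simp [hr0, List.getD] at h hc ⊢
      exact countP_set_lt row c.toNat hc h
    · obtain ⟨n, hn⟩ : ∃ n, r.toNat = n + 1 := ⟨r.toNat - 1, by omega⟩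
      have := ih (n : Int) (by simp [hn] at hr; simpa using hr)
        (by simpa [hn, List.getD] using hc) (by simpa [hn, List.getD] using h)
      simp [hn, List.getD] at this ⊢
      exact this

lemma ucount_le_of_rows (k : Nat) : ∀ (v : List (List Bool)),
    (∀ row ∈ v, row.length = k) → ucount v ≤ v.length * k := by
  intro v
  induction v with
  | nil => intro _; simp [ucount]
  | cons row t ih =>
    intro hrows
    have h1 : row.countP (fun b => !b) ≤ k := by
      calc row.countP (fun b => !b) ≤ row.length := List.countP_le_length
        _ = k := hrows row (by simp)
    have h2 := ih (fun r hr => hrows r (by simp [hr]))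
    simp only [ucount, List.map_cons, List.sum_cons, List.length_cons] at h2 ⊢
    calc row.countP (fun b => !b) + (t.map (fun row => row.countP (fun b => !b))).sum
        ≤ k + t.length * k := by omega
      _ = (t.length + 1) * k := by ring

lemma ucount_le_total (m : List (List Int)) (v : List (List Bool)) (h : Shape m v) :
    ucount v ≤ m.length * (m.headD []).length := by
  have := ucount_le_of_rows ((m.headD []).length) v h.2
  rw [h.1] at this
  exact this

lemma dfsA_shape (m : List (List Int)) (rows cols : Int) (fuel : Nat) (v : List (List Bool))
    (r c : Int) (h : Shape m v) : Shape m (dfsA m rows cols fuel v r c) := by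
  induction fuel generalizing v r c with
  | zero => exact h
  | succ fuel ih =>
    rw [dfsA]
    split
    · exact h
    · exact ih _ _ _ (ih _ _ _ (ih _ _ _ (ih _ _ _ (vset_shape m v r c h))))

lemma ucount_dfsA_le (m : List (List Int)) (rows cols : Int) (fuel : Nat) (v : List (List Bool))
    (r c : Int) : ucount (dfsA m rows cols fuel v r c) ≤ ucount v := by
  induction fuel generalizing v r c with
  | zero => exact le_refl _
  | succ fuel ih =>
    rw [dfsA]
    split
    · exact le_refl _
    · calc ucount (dfsA m rows cols fuel (dfsA m rows cols fuel (dfsA m rows cols fuel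
            (dfsA m rows cols fuel (vset v r c) (r + 1) c) (r - 1) c) r (c + 1)) r (c - 1))
          ≤ ucount (vset v r c) := le_trans (ih _ _ _) (le_trans (ih _ _ _) (le_trans (ih _ _ _) (ih _ _ _)))
        _ ≤ ucount v := ucount_vset_le v r c

-- marking more cells can only shrink reachability
lemma Reach_anti (m : List (List Int)) (rows cols : Int) (v v' : List (List Bool))
    (hmono : ∀ x y : Int, 0 ≤ x → 0 ≤ y → vget v x y = true → vget v' x y = true)
    {r c x y : Int} (h : Reach m rows cols v' r c x y) : Reach m rows cols v r c x y := by
  induction h with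
  | refl r c hg =>
    refine Reach.refl r c ?_
    rw [guard_false_iff] at hg ⊢
    obtain ⟨h1, h2, h3, h4, h5, h6⟩ := hg
    refine ⟨h1, h2, h3, h4, ?_, h6⟩
    cases hv : vget v r c
    · rfl
    · exact absurd (hmono r c h1 h3 hv) (by simp [h5])
  | step r c r' c' x y hg adj hp ih =>
    refine Reach.step r c r' c' x y ?_ adj ih
    rw [guard_false_iff] at hg ⊢
    obtain ⟨h1, h2, h3, h4, h5, h6⟩ := hg
    refine ⟨h1, h2, h3, h4, ?_, h6⟩
    cases hv : vget v r c
    · rfl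
    · exact absurd (hmono r c h1 h3 hv) (by simp [h5])

lemma Reach_trans (m : List (List Int)) (rows cols : Int) (v : List (List Bool))
    {r c p q x y : Int} (h1 : Reach m rows cols v r c p q)
    (h2 : Reach m rows cols v p q x y) : Reach m rows cols v r c x y := by
  induction h1 with
  | refl r c hg => exact h2
  | step r c r' c' _ _ hg adj hp ih => exact Reach.step r c r' c' x y hg adj (ih h2)

lemma Reach_guard (m : List (List Int)) (rows cols : Int) (v : List (List Bool))
    {r c x y : Int} (h : Reach m rows cols v r c x y) : dfsGuard m rows cols v r c = false := by
  cases h with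
  | refl _ _ h => exact h
  | step _ _ _ _ _ _ h _ _ => exact h

lemma Reach_guard_end (m : List (List Int)) (rows cols : Int) (v : List (List Bool))
    {r c x y : Int} (h : Reach m rows cols v r c x y) : dfsGuard m rows cols v x y = false := by
  induction h with
  | refl _ _ h => exact h
  | step _ _ _ _ _ _ _ _ _ ih => exact ih

lemma guard_vset_of_ne (m : List (List Int)) (rows cols : Int) (v : List (List Bool))
    (r c t u : Int) (hok : dfsGuard m rows cols v r c = false)
    (hr : r.toNat < v.length) (hc : c.toNat < (v.getD r.toNat []).length)
    (hg : dfsGuard m rows cols v t u = false) (hne : ¬(t = r ∧ u = c)) :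
    dfsGuard m rows cols (vset v r c) t u = false := by
  rw [guard_false_iff] at hok hg ⊢
  obtain ⟨g1, g2, g3, g4, g5, g6⟩ := hg
  refine ⟨g1, g2, g3, g4, ?_, g6⟩
  rw [vget_vset v r c hr hc t u]
  have : ¬(t.toNat = r.toNat ∧ u.toNat = c.toNat) := by
    intro hEq
    exact hne ⟨by omega, by omega⟩
  simp [this, g5]

-- decomposition of reachability from a guard-passing cell into its four neighbours
lemma Adj_r1 (r c : Int) : Adj r c (r + 1) c := Or.inl ⟨rfl, rfl⟩
lemma Adj_r2 (r c : Int) : Adj r c (r - 1) c := Or.inr (Or.inl ⟨rfl, rfl⟩)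
lemma Adj_c1 (r c : Int) : Adj r c r (c + 1) := Or.inr (Or.inr (Or.inl ⟨rfl, rfl⟩))
lemma Adj_c2 (r c : Int) : Adj r c r (c - 1) := Or.inr (Or.inr (Or.inr ⟨rfl, rfl⟩))

lemma Reach_decomp_aux (m : List (List Int)) (rows cols : Int) (v : List (List Bool)) (r c : Int)
    (hok : dfsGuard m rows cols v r c = false)
    (hr : r.toNat < v.length) (hc : c.toNat < (v.getD r.toNat []).length)
    {t u x y : Int} (h : Reach m rows cols v t u x y) :
    Reach m rows cols (vset v r c) t u x y ∨ ((x = r ∧ y = c) ∨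
      Reach m rows cols (vset v r c) (r + 1) c x y ∨
      Reach m rows cols (vset v r c) (r - 1) c x y ∨
      Reach m rows cols (vset v r c) r (c + 1) x y ∨
      Reach m rows cols (vset v r c) r (c - 1) x y) := by
  induction h with
  | refl t u hg =>
    by_cases he : t = r ∧ u = c
    · exact Or.inr (Or.inl he)
    · exact Or.inl (Reach.refl t u (guard_vset_of_ne m rows cols v r c t u hok hr hc hg he))
  | step t u t' u' x y hg adj hp ih =>
    rcases ih with hL | hR
    · by_cases he : t = r ∧ u = c
      · rw [he.1, he.2] at adj
        rcases adj with ⟨e1, e2⟩ | ⟨e1, e2⟩ | ⟨e1, e2⟩ | ⟨e1, e2⟩ <;> rw [e1, e2] at hL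
        · exact Or.inr (Or.inr (Or.inl hL))
        · exact Or.inr (Or.inr (Or.inr (Or.inl hL)))
        · exact Or.inr (Or.inr (Or.inr (Or.inr (Or.inl hL))))
        · exact Or.inr (Or.inr (Or.inr (Or.inr (Or.inr hL))))
      · exact Or.inl (Reach.step t u t' u' x y
          (guard_vset_of_ne m rows cols v r c t u hok hr hc hg he) adj hL)
    · exact Or.inr hR

lemma Reach_decomp (m : List (List Int)) (rows cols : Int) (v : List (List Bool)) (r c : Int)
    (hok : dfsGuard m rows cols v r c = false)
    (hr : r.toNat < v.length) (hc : c.toNat < (v.getD r.toNat []).length) (x y : Int) :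
    Reach m rows cols v r c x y ↔
      (x = r ∧ y = c) ∨ Reach m rows cols (vset v r c) (r + 1) c x y ∨
        Reach m rows cols (vset v r c) (r - 1) c x y ∨
        Reach m rows cols (vset v r c) r (c + 1) x y ∨
        Reach m rows cols (vset v r c) r (c - 1) x y := by
  constructor
  · intro h
    rcases Reach_decomp_aux m rows cols v r c hok hr hc h with hL | hR
    · exfalso
      have hg := Reach_guard m rows cols (vset v r c) hL
      rw [guard_false_iff] at hg
      have hv : vget (vset v r c) r c = true := by
        rw [vget_vset v r c hr hc r c]; simp
      rw [hg.2.2.2.2.1] at hv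
      exact absurd hv (by simp)
    · exact hR
  · have hmono : ∀ x y : Int, 0 ≤ x → 0 ≤ y → vget v x y = true → vget (vset v r c) x y = true :=
      fun x y _ _ hv => vset_mono v r c x y hv
    rintro (⟨e1, e2⟩ | h | h | h | h)
    · rw [e1, e2]; exact Reach.refl r c hok
    · exact Reach.step r c (r + 1) c x y hok (Adj_r1 r c) (Reach_anti m rows cols v _ hmono h)
    · exact Reach.step r c (r - 1) c x y hok (Adj_r2 r c) (Reach_anti m rows cols v _ hmono h)
    · exact Reach.step r c r (c + 1) x y hok (Adj_c1 r c) (Reach_anti m rows cols v _ hmono h)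
    · exact Reach.step r c r (c - 1) x y hok (Adj_c2 r c) (Reach_anti m rows cols v _ hmono h)

lemma guard_transfer (m : List (List Int)) (rows cols : Int) (v w : List (List Bool))
    (t u : Int) (hg : dfsGuard m rows cols v t u = false) (hv : vget w t u = false) :
    dfsGuard m rows cols w t u = false := by
  rw [guard_false_iff] at hg ⊢
  exact ⟨hg.1, hg.2.1, hg.2.2.1, hg.2.2.2.1, hv, hg.2.2.2.2.2⟩

lemma Reach_absorb (m : List (List Int)) (rows cols : Int) (v w : List (List Bool))
    (Q : Int → Int → Prop)
    (hQ : ∀ p q x y : Int, Q p q → Reach m rows cols v p q x y → Q x y)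
    (hw : ∀ x y : Int, 0 ≤ x → 0 ≤ y → (vget w x y = true ↔ vget v x y = true ∨ Q x y))
    {t u x y : Int} :
    (Reach m rows cols w t u x y ∨ Q x y) ↔ (Reach m rows cols v t u x y ∨ Q x y) := by
  constructor
  · rintro (h | h)
    · exact Or.inl (Reach_anti m rows cols v w
        (fun x y hx hy hv => (hw x y hx hy).mpr (Or.inl hv)) h)
    · exact Or.inr h
  · rintro (h | h)
    · induction h with
      | refl t u hg =>
        have hb := (guard_false_iff m rows cols v t u).mp hg
        by_cases hvw : vget w t u = true
        · rcases (hw t u hb.1 hb.2.2.1).mp hvw with hv | hq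
          · rw [hb.2.2.2.2.1] at hv; exact absurd hv (by simp)
          · exact Or.inr hq
        · exact Or.inl (Reach.refl t u
            (guard_transfer m rows cols v w t u hg (by simpa using hvw)))
      | step t u t' u' x y hg adj hp ih =>
        have hb := (guard_false_iff m rows cols v t u).mp hg
        rcases ih with hL | hq
        · by_cases hvw : vget w t u = true
          · rcases (hw t u hb.1 hb.2.2.1).mp hvw with hv | hq
            · rw [hb.2.2.2.2.1] at hv; exact absurd hv (by simp)
            · exact Or.inr (hQ t u x y hq (Reach.step t u t' u' x y hg adj hp))
          · exact Or.inl (Reach.step t u t' u' x y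
              (guard_transfer m rows cols v w t u hg (by simpa using hvw)) adj hL)
        · exact Or.inr hq
    · exact Or.inr h

lemma bounds_of_guard (m : List (List Int)) (rows cols : Int)
    (hrows : rows = (m.length : Int)) (hcols : cols = ((m.headD []).length : Int))
    (v : List (List Bool)) (h : Shape m v) (r c : Int)
    (hg : dfsGuard m rows cols v r c = false) :
    r.toNat < v.length ∧ c.toNat < (v.getD r.toNat []).length := by
  rw [guard_false_iff] at hg
  obtain ⟨h1, h2, h3, h4, _, _⟩ := hg
  have hrN : r.toNat < v.length := by rw [h.1]; omega
  refine ⟨hrN, ?_⟩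
  have hmem : v.getD r.toNat [] ∈ v := by
    rw [List.getD_eq_getElem _ _ hrN]; exact List.getElem_mem _
  rw [h.2 _ hmem]
  omega

-- in-bounds indices are inside a shaped grid
lemma bounds_toNat (m : List (List Int)) (v : List (List Bool)) (h : Shape m v) (r c : Int)
    (hr0 : 0 ≤ r) (hr : r < (m.length : Int)) (hc0 : 0 ≤ c)
    (hc : c < ((m.headD []).length : Int)) :
    r.toNat < v.length ∧ c.toNat < (v.getD r.toNat []).length := by
  have hrN : r.toNat < v.length := by rw [h.1]; omega
  refine ⟨hrN, ?_⟩
  have hmem : v.getD r.toNat [] ∈ v := by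
    rw [List.getD_eq_getElem _ _ hrN]; exact List.getElem_mem _
  rw [h.2 _ hmem]
  omega

lemma stage_shuffle1 {P C D B : Prop} (hab : (D ∨ C) ↔ (B ∨ C)) :
    ((P ∨ C) ∨ D) ↔ (P ∨ C ∨ B) := by tauto

lemma stage_shuffle2 {P C1 C2 D B : Prop} (hab : (D ∨ (C1 ∨ C2)) ↔ (B ∨ (C1 ∨ C2))) :
    ((P ∨ (C1 ∨ C2)) ∨ D) ↔ (P ∨ C1 ∨ C2 ∨ B) := by tauto

lemma stage_shuffle3 {P C1 C2 C3 D B : Prop} (hab : (D ∨ (C1 ∨ C2 ∨ C3)) ↔ (B ∨ (C1 ∨ C2 ∨ C3))) :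
    ((P ∨ (C1 ∨ C2 ∨ C3)) ∨ D) ↔ (P ∨ C1 ∨ C2 ∨ C3 ∨ B) := by tauto

lemma dfsA_assemble {PV1 Pv E R1 R2 R3 R4 RC : Prop}
    (h1 : PV1 ↔ (E ∨ Pv)) (h2 : RC ↔ (E ∨ R1 ∨ R2 ∨ R3 ∨ R4)) :
    (PV1 ∨ R1 ∨ R2 ∨ R3 ∨ R4) ↔ (Pv ∨ RC) := by tauto

set_option maxHeartbeats 2000000 in
lemma dfsA_char (m : List (List Int)) (rows cols : Int)
    (hrows : rows = (m.length : Int)) (hcols : cols = ((m.headD []).length : Int)) :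
    ∀ (fuel : Nat) (v : List (List Bool)) (r c : Int), Shape m v → ucount v < fuel →
      ∀ x y : Int, 0 ≤ x → 0 ≤ y →
        (vget (dfsA m rows cols fuel v r c) x y = true ↔
          vget v x y = true ∨ Reach m rows cols v r c x y) := by
  intro fuel
  induction fuel with
  | zero => intro v r c _ hU; omega
  | succ fuel ih =>
    intro v r c hS hU x y hx hy
    rw [dfsA]
    split
    case isTrue hg =>
      constructor
      · exact Or.inl
      · rintro (h | h)
        · exact h
        · have := Reach_guard m rows cols v h
          simp [hg] at this
    case isFalse hgT =>
      dsimp only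
      have hg : dfsGuard m rows cols v r c = false := by simpa using hgT
      obtain ⟨hr, hc⟩ := bounds_of_guard m rows cols hrows hcols v hS r c hg
      have hgiff := (guard_false_iff m rows cols v r c).mp hg
      have hS1 : Shape m (vset v r c) := vset_shape m v r c hS
      have hU1 : ucount (vset v r c) < fuel := by
        have := ucount_vset_lt v r c hr hc hgiff.2.2.2.2.1
        omega
      have ch2 : ∀ x y : Int, 0 ≤ x → 0 ≤ y →
          (vget (dfsA m rows cols fuel (vset v r c) (r + 1) c) x y = true ↔
            vget (vset v r c) x y = true ∨
              Reach m rows cols (vset v r c) (r + 1) c x y) :=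
        fun x y hx hy => ih (vset v r c) (r + 1) c hS1 hU1 x y hx hy
      set v1 := vset v r c with hv1def
      clear_value v1
      set v2 := dfsA m rows cols fuel v1 (r + 1) c with hv2def
      clear_value v2
      have hS2 : Shape m v2 := by rw [hv2def]; exact dfsA_shape m rows cols fuel v1 (r + 1) c hS1
      have hU2 : ucount v2 < fuel := by
        rw [hv2def]; exact lt_of_le_of_lt (ucount_dfsA_le m rows cols fuel v1 (r + 1) c) hU1
      have hQ1 : ∀ p q x y : Int, Reach m rows cols v1 (r + 1) c p q →
          Reach m rows cols v1 p q x y → Reach m rows cols v1 (r + 1) c x y :=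
        fun p q x y h1 h2 => Reach_trans m rows cols v1 h1 h2
      have ch3 : ∀ x y : Int, 0 ≤ x → 0 ≤ y →
          (vget (dfsA m rows cols fuel v2 (r - 1) c) x y = true ↔
            vget v1 x y = true ∨ (Reach m rows cols v1 (r + 1) c x y ∨
              Reach m rows cols v1 (r - 1) c x y)) := by
        intro x y hx hy
        rw [ih v2 (r - 1) c hS2 hU2 x y hx hy, ch2 x y hx hy]
        have ab := Reach_absorb m rows cols v1 v2 (Reach m rows cols v1 (r + 1) c) hQ1 ch2
          (t := r - 1) (u := c) (x := x) (y := y)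
        exact (stage_shuffle1 ab).trans (by tauto)
      set v3 := dfsA m rows cols fuel v2 (r - 1) c with hv3def
      clear_value v3
      have hS3 : Shape m v3 := by rw [hv3def]; exact dfsA_shape m rows cols fuel v2 (r - 1) c hS2
      have hU3 : ucount v3 < fuel := by
        rw [hv3def]; exact lt_of_le_of_lt (ucount_dfsA_le m rows cols fuel v2 (r - 1) c) hU2
      have hQ2 : ∀ p q x y : Int,
          (Reach m rows cols v1 (r + 1) c p q ∨ Reach m rows cols v1 (r - 1) c p q) →
          Reach m rows cols v1 p q x y →
          (Reach m rows cols v1 (r + 1) c x y ∨ Reach m rows cols v1 (r - 1) c x y) := by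
        rintro p q x y (h1 | h1) h2
        · exact Or.inl (Reach_trans m rows cols v1 h1 h2)
        · exact Or.inr (Reach_trans m rows cols v1 h1 h2)
      have ch4 : ∀ x y : Int, 0 ≤ x → 0 ≤ y →
          (vget (dfsA m rows cols fuel v3 r (c + 1)) x y = true ↔
            vget v1 x y = true ∨ (Reach m rows cols v1 (r + 1) c x y ∨
              Reach m rows cols v1 (r - 1) c x y ∨ Reach m rows cols v1 r (c + 1) x y)) := by
        intro x y hx hy
        rw [ih v3 r (c + 1) hS3 hU3 x y hx hy, ch3 x y hx hy]
        have ab := Reach_absorb m rows cols v1 v3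
          (fun x y => Reach m rows cols v1 (r + 1) c x y ∨ Reach m rows cols v1 (r - 1) c x y)
          hQ2 ch3 (t := r) (u := c + 1) (x := x) (y := y)
        exact (stage_shuffle2 ab).trans (by tauto)
      set v4 := dfsA m rows cols fuel v3 r (c + 1) with hv4def
      clear_value v4
      have hS4 : Shape m v4 := by rw [hv4def]; exact dfsA_shape m rows cols fuel v3 r (c + 1) hS3
      have hU4 : ucount v4 < fuel := by
        rw [hv4def]; exact lt_of_le_of_lt (ucount_dfsA_le m rows cols fuel v3 r (c + 1)) hU3
      have hQ3 : ∀ p q x y : Int,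
          (Reach m rows cols v1 (r + 1) c p q ∨ Reach m rows cols v1 (r - 1) c p q ∨
            Reach m rows cols v1 r (c + 1) p q) →
          Reach m rows cols v1 p q x y →
          (Reach m rows cols v1 (r + 1) c x y ∨ Reach m rows cols v1 (r - 1) c x y ∨
            Reach m rows cols v1 r (c + 1) x y) := by
        rintro p q x y (h1 | h1 | h1) h2
        · exact Or.inl (Reach_trans m rows cols v1 h1 h2)
        · exact Or.inr (Or.inl (Reach_trans m rows cols v1 h1 h2))
        · exact Or.inr (Or.inr (Reach_trans m rows cols v1 h1 h2))
      have ch4Q : ∀ x y : Int, 0 ≤ x → 0 ≤ y → (vget v4 x y = true ↔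
          vget v1 x y = true ∨ (Reach m rows cols v1 (r + 1) c x y ∨
            Reach m rows cols v1 (r - 1) c x y ∨ Reach m rows cols v1 r (c + 1) x y)) := by
        intro x y hx hy
        exact ch4 x y hx hy
      have ch5 : vget (dfsA m rows cols fuel v4 r (c - 1)) x y = true ↔
          vget v1 x y = true ∨ Reach m rows cols v1 (r + 1) c x y ∨
            Reach m rows cols v1 (r - 1) c x y ∨ Reach m rows cols v1 r (c + 1) x y ∨
            Reach m rows cols v1 r (c - 1) x y := by
        rw [ih v4 r (c - 1) hS4 hU4 x y hx hy, ch4Q x y hx hy]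
        have ab := Reach_absorb m rows cols v1 v4
          (fun x y => Reach m rows cols v1 (r + 1) c x y ∨ Reach m rows cols v1 (r - 1) c x y ∨
            Reach m rows cols v1 r (c + 1) x y)
          hQ3 ch4Q (t := r) (u := c - 1) (x := x) (y := y)
        exact (stage_shuffle3 ab).trans (by tauto)
      have hv1c : vget v1 x y = true ↔ (x = r ∧ y = c) ∨ vget v x y = true := by
        rw [hv1def, vget_vset v r c hr hc x y]
        by_cases hcnd : x.toNat = r.toNat ∧ y.toNat = c.toNat
        · rw [if_pos hcnd]
          constructor
          · intro _
            exact Or.inl ⟨by omega, by omega⟩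
          · intro _; rfl
        · rw [if_neg hcnd]
          constructor
          · exact Or.inr
          · rintro (⟨e1, e2⟩ | h)
            · exact absurd ⟨by omega, by omega⟩ hcnd
            · exact h
      have hdec := Reach_decomp m rows cols v r c hg hr hc x y
      rw [← hv1def] at hdec
      rw [ch5]
      exact dfsA_assemble hv1c hdec

lemma grid_eq (a b : List (List Bool)) (hl : a.length = b.length)
    (hrow : ∀ (i : Nat) (h1 : i < a.length) (h2 : i < b.length), a[i].length = b[i].length)
    (hp : ∀ i j : Nat, vget a (i : Int) (j : Int) = vget b (i : Int) (j : Int)) : a = b := by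
  apply List.ext_getElem hl
  intro i h1 h2
  apply List.ext_getElem (hrow i h1 h2)
  intro j j1 j2
  have h := hp i j
  rw [vget_natCast, vget_natCast, List.getD_eq_getElem _ _ h1, List.getD_eq_getElem _ _ h2,
    List.getD_eq_getElem _ _ j1, List.getD_eq_getElem _ _ j2] at h
  exact h

lemma shape_init (m : List (List Int)) : Shape m (vinitL m) := by
  constructor
  · exact List.length_replicate
  · intro row hrow
    rw [List.eq_of_mem_replicate hrow]
    exact List.length_replicate

lemma getD_replicate' {α : Type} (n : Nat) (a : α) (i : Nat) (d : α) :
    (List.replicate n a).getD i d = if i < n then a else d := by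
  by_cases h : i < n
  · rw [List.getD_eq_getElem?_getD, List.getElem?_replicate, if_pos h, if_pos h, Option.getD_some]
  · rw [List.getD_eq_getElem?_getD, List.getElem?_replicate, if_neg h, if_neg h, Option.getD_none]

lemma vget_vinit (m : List (List Int)) (x y : Int) : vget (vinitL m) x y = false := by
  unfold vget vinitL
  rw [getD_replicate']
  split
  · rw [getD_replicate']
    split <;> rfl
  · simp [List.getD]

lemma guard0_iff (m : List (List Int)) (r c : Int) :
    dfsGuard m (m.length : Int) ((m.headD []).length : Int) (vinitL m) r c = false ↔
      0 ≤ r ∧ r < (m.length : Int) ∧ 0 ≤ c ∧ c < ((m.headD []).length : Int) ∧ mget m r c ≠ 0 := by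
  rw [guard_false_iff]
  simp [vget_vinit]

lemma SReach_adj (m : List (List Int)) {p q r c : Int}
    (h : SReach m p q) (hadj : Adj p q r c)
    (hg : dfsGuard m (m.length : Int) ((m.headD []).length : Int) (vinitL m) r c = false) :
    SReach m r c := by
  obtain ⟨a, b, hm, hr⟩ := h
  have hgp : dfsGuard m (m.length : Int) ((m.headD []).length : Int) (vinitL m) p q = false :=
    Reach_guard_end m _ _ _ hr
  exact ⟨a, b, hm, Reach_trans m _ _ _ hr
    (Reach.step p q r c r c hgp hadj (Reach.refl r c hg))⟩

lemma QL_closed (m : List (List Int)) (L : List (Int × Int)) {p q x y : Int}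
    (h1 : QL m L p q) (h2 : Reach0 m p q x y) : QL m L x y := by
  obtain ⟨rc, hrc, hm, hr⟩ := h1
  exact ⟨rc, hrc, hm, Reach_trans m _ _ _ hr h2⟩

lemma mem_cellList (m : List (List Int)) (r c : Int)
    (hr0 : 0 ≤ r) (hr : r < (m.length : Int)) (hc0 : 0 ≤ c)
    (hc : c < ((m.headD []).length : Int)) : (r, c) ∈ cellList m := by
  unfold cellList
  simp only [List.mem_flatMap, List.mem_map, List.mem_range]
  exact ⟨r.toNat, by omega, c.toNat, by omega,
    by rw [Int.toNat_of_nonneg hr0, Int.toNat_of_nonneg hc0]⟩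

lemma cellList_bounds (m : List (List Int)) (rc : Int × Int) (h : rc ∈ cellList m) :
    0 ≤ rc.1 ∧ rc.1 < (m.length : Int) ∧ 0 ≤ rc.2 ∧ rc.2 < ((m.headD []).length : Int) := by
  unfold cellList at h
  simp only [List.mem_flatMap, List.mem_map, List.mem_range] at h
  obtain ⟨r, hr, c, hc, he⟩ := h
  subst he
  refine ⟨Int.natCast_nonneg r, ?_, Int.natCast_nonneg c, ?_⟩
  · show (r : Int) < (m.length : Int)
    exact_mod_cast hr
  · show (c : Int) < ((m.headD []).length : Int)
    exact_mod_cast hc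

-- the nested row/column loops are one fold over the list of all cells
lemma nested_foldl_eq {β : Type} (f : β → Int × Int → β) (C : Nat) :
    ∀ (lr : List Nat) (b : β),
      lr.foldl (fun (b : β) (r : Nat) =>
          (List.range C).foldl (fun (b : β) (c : Nat) => f b ((r : Int), (c : Int))) b) b
        = (lr.flatMap (fun (r : Nat) =>
            (List.range C).map (fun (c : Nat) => ((r : Int), (c : Int))))).foldl f b := by
  intro lr
  induction lr with
  | nil => intro b; rfl
  | cons r t ih =>
    intro b
    simp only [List.foldl_cons, List.flatMap_cons, List.foldl_append, List.foldl_map]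
    exact ih _

-- ========= B-side lemmas =========

lemma initB_shape (m : List (List Int)) : Shape m (initB m) := by
  constructor
  · unfold initB
    rw [List.length_map, List.length_range]
  · intro row hrow
    unfold initB at hrow
    rw [List.mem_map] at hrow
    obtain ⟨r, _, he⟩ := hrow
    rw [← he, List.length_map, List.length_range]

lemma vget_initB (m : List (List Int)) (x y : Int) (hx : 0 ≤ x) (hy : 0 ≤ y) :
    (vget (initB m) x y = true ↔
      x < (m.length : Int) ∧ y < ((m.headD []).length : Int) ∧ mget m x y = 1) := by
  unfold vget initB
  by_cases hxm : x.toNat < m.length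
  · by_cases hyc : y.toNat < (m.headD []).length
    · simp only [List.getD_eq_getElem?_getD, List.getElem?_map, List.getElem?_range, hxm, hyc,
        if_true, Option.map_some, Option.getD_some]
      rw [Int.toNat_of_nonneg hx, Int.toNat_of_nonneg hy]
      constructor
      · intro h
        exact ⟨by omega, by omega, by simpa using h⟩
      · intro h
        simpa using h.2.2
    · have h2 : (List.range (m.headD []).length)[y.toNat]? = none :=
        List.getElem?_eq_none (by simp only [List.length_range]; omega)
      simp only [List.getD_eq_getElem?_getD, List.getElem?_map, List.getElem?_range, hxm,
        if_true, Option.map_some, Option.getD_some, h2, Option.map_none, Option.getD_none]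
      constructor
      · intro h
        exact absurd h (by simp)
      · intro h
        omega
  · have h2 : (List.range m.length)[x.toNat]? = none :=
      List.getElem?_eq_none (by simp only [List.length_range]; omega)
    simp only [List.getD_eq_getElem?_getD, List.getElem?_map, h2, Option.map_none,
      Option.getD_none, List.getElem?_nil]
    constructor
    · intro h
      exact absurd h (by simp)
    · intro h
      omega

lemma initB_sub (m : List (List Int)) : MSub m (initB m) := by
  intro x y hx hy h
  rw [vget_initB m x y hx hy] at h
  obtain ⟨h1, h2, h3⟩ := h
  refine ⟨x, y, h3, Reach.refl x y ?_⟩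
  rw [guard0_iff]
  exact ⟨hx, h1, hy, h2, by omega⟩

-- a marked neighbour makes the neighbour test true
lemma nbr_of_adj (g : List (List Bool)) (m : List (List Int)) {p q p' q' : Int}
    (hadj : Adj p q p' q') (hp0 : 0 ≤ p) (hp : p < (m.length : Int)) (hq0 : 0 ≤ q)
    (hq : q < ((m.headD []).length : Int)) (hv : vget g p q = true) :
    nbr (m.length : Int) ((m.headD []).length : Int) g p' q' = true := by
  unfold nbr
  simp only [Bool.or_eq_true, Bool.and_eq_true, decide_eq_true_eq]
  rcases hadj with ⟨e1, e2⟩ | ⟨e1, e2⟩ | ⟨e1, e2⟩ | ⟨e1, e2⟩ <;> subst e1 <;> subst e2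
  · exact Or.inl (Or.inl (Or.inl ⟨by omega, by rw [show p + 1 - 1 = p by omega]; exact hv⟩))
  · exact Or.inl (Or.inl (Or.inr ⟨by omega, by rw [show p - 1 + 1 = p by omega]; exact hv⟩))
  · exact Or.inl (Or.inr ⟨by omega, by rw [show q + 1 - 1 = q by omega]; exact hv⟩)
  · exact Or.inr ⟨by omega, by rw [show q - 1 + 1 = q by omega]; exact hv⟩

lemma sub_after_mark (m : List (List Int)) (v : List (List Bool)) (r c : Int)
    (hS : Shape m v) (hsub : MSub m v)
    (hr0 : 0 ≤ r) (hr : r < (m.length : Int)) (hc0 : 0 ≤ c)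
    (hc : c < ((m.headD []).length : Int)) (hm : mget m r c ≠ 0)
    (hn : nbr (m.length : Int) ((m.headD []).length : Int) v r c = true) :
    MSub m (vset v r c) := by
  obtain ⟨hbr, hbc⟩ := bounds_toNat m v hS r c hr0 hr hc0 hc
  have hrc : SReach m r c := by
    have hg : dfsGuard m (m.length : Int) ((m.headD []).length : Int) (vinitL m) r c = false := by
      rw [guard0_iff]; exact ⟨hr0, hr, hc0, hc, hm⟩
    unfold nbr at hn
    simp only [Bool.or_eq_true, Bool.and_eq_true, decide_eq_true_eq] at hn
    rcases hn with ((⟨h1, h2⟩ | ⟨h1, h2⟩) | ⟨h1, h2⟩) | ⟨h1, h2⟩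
    · exact SReach_adj m (hsub (r - 1) c (by omega) hc0 h2)
        (Or.inl ⟨by omega, rfl⟩) hg
    · exact SReach_adj m (hsub (r + 1) c (by omega) hc0 h2)
        (Or.inr (Or.inl ⟨by omega, rfl⟩)) hg
    · exact SReach_adj m (hsub r (c - 1) hr0 (by omega) h2)
        (Or.inr (Or.inr (Or.inl ⟨rfl, by omega⟩))) hg
    · exact SReach_adj m (hsub r (c + 1) hr0 (by omega) h2)
        (Or.inr (Or.inr (Or.inr ⟨rfl, by omega⟩))) hg
  intro x y hx hy h
  rw [vget_vset v r c hbr hbc x y] at h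
  by_cases hcase : x.toNat = r.toNat ∧ y.toNat = c.toNat
  · have : x = r ∧ y = c := ⟨by omega, by omega⟩
    rw [this.1, this.2]
    exact hrc
  · rw [if_neg hcase] at h
    exact hsub x y hx hy h

-- sweepCell facts
lemma sweepCell_flag_mono (m : List (List Int)) (rows cols : Int)
    (st : List (List Bool) × Bool) (rc : Int × Int) (h : st.2 = true) :
    (sweepCell m rows cols st rc).2 = true := by
  unfold sweepCell
  split
  · rfl
  · exact h

lemma sweepCell_flag_false (m : List (List Int)) (rows cols : Int)
    (st : List (List Bool) × Bool) (rc : Int × Int)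
    (h : (sweepCell m rows cols st rc).2 = false) : sweepCell m rows cols st rc = st := by
  unfold sweepCell at h ⊢
  by_cases hc : (!vget st.1 rc.1 rc.2 && decide (mget m rc.1 rc.2 ≠ 0) &&
      nbr rows cols st.1 rc.1 rc.2) = true
  · rw [if_pos hc] at h
    exact absurd h (by simp)
  · rw [if_neg hc]

lemma fold_flag_mono (m : List (List Int)) (rows cols : Int) :
    ∀ (cells : List (Int × Int)) (st : List (List Bool) × Bool), st.2 = true →
      (cells.foldl (sweepCell m rows cols) st).2 = true := by
  intro cells
  induction cells with
  | nil => intro st h; exact h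
  | cons rc t ih =>
    intro st h
    exact ih _ (sweepCell_flag_mono m rows cols st rc h)

-- the grand sweep invariant
lemma sweep_fold_inv (m : List (List Int)) :
    ∀ (cells : List (Int × Int)),
      (∀ rc ∈ cells, 0 ≤ rc.1 ∧ rc.1 < (m.length : Int) ∧ 0 ≤ rc.2 ∧
        rc.2 < ((m.headD []).length : Int)) →
    ∀ (st : List (List Bool) × Bool), Shape m st.1 → MSub m st.1 →
      Shape m (cells.foldl (sweepCell m (m.length : Int) ((m.headD []).length : Int)) st).1 ∧
      MSub m (cells.foldl (sweepCell m (m.length : Int) ((m.headD []).length : Int)) st).1 ∧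
      (∀ x y : Int, vget st.1 x y = true →
        vget (cells.foldl (sweepCell m (m.length : Int) ((m.headD []).length : Int)) st).1 x y = true) ∧
      ucount (cells.foldl (sweepCell m (m.length : Int) ((m.headD []).length : Int)) st).1 ≤ ucount st.1 ∧
      ((cells.foldl (sweepCell m (m.length : Int) ((m.headD []).length : Int)) st).2 = true →
        st.2 = true ∨
          ucount (cells.foldl (sweepCell m (m.length : Int) ((m.headD []).length : Int)) st).1 < ucount st.1) := by
  intro cells
  induction cells with
  | nil =>
    intro _ st hS hsub
    exact ⟨hS, hsub, fun _ _ h => h, le_refl _, fun h => Or.inl h⟩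
  | cons rc t ih =>
    intro hb st hS hsub
    obtain ⟨hr0, hr, hc0, hc⟩ := hb rc (by simp)
    have hbt := fun x hx => hb x (List.mem_cons_of_mem rc hx)
    simp only [List.foldl_cons]
    by_cases hcond : (!vget st.1 rc.1 rc.2 && decide (mget m rc.1 rc.2 ≠ 0) &&
        nbr (m.length : Int) ((m.headD []).length : Int) st.1 rc.1 rc.2) = true
    · have hst1 : sweepCell m (m.length : Int) ((m.headD []).length : Int) st rc =
          (vset st.1 rc.1 rc.2, true) := by
        unfold sweepCell
        rw [if_pos hcond]
      simp only [Bool.and_eq_true, Bool.not_eq_eq_eq_not, Bool.not_true, decide_eq_true_eq] at hcond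
      obtain ⟨⟨hvf, hmz⟩, hn⟩ := hcond
      obtain ⟨hbr, hbc⟩ := bounds_toNat m st.1 hS rc.1 rc.2 hr0 hr hc0 hc
      have hS1 : Shape m (vset st.1 rc.1 rc.2) := vset_shape m st.1 rc.1 rc.2 hS
      have hsub1 : MSub m (vset st.1 rc.1 rc.2) :=
        sub_after_mark m st.1 rc.1 rc.2 hS hsub hr0 hr hc0 hc hmz hn
      have hlt : ucount (vset st.1 rc.1 rc.2) < ucount st.1 :=
        ucount_vset_lt st.1 rc.1 rc.2 hbr hbc hvf
      obtain ⟨c1, c2, c3, c4, _⟩ := ih hbt (vset st.1 rc.1 rc.2, true) hS1 hsub1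
      rw [show ((vset st.1 rc.1 rc.2, true) : List (List Bool) × Bool).1 =
        vset st.1 rc.1 rc.2 from rfl] at c4
      rw [hst1]
      refine ⟨c1, c2, ?_, by omega, ?_⟩
      · intro x y h
        exact c3 x y (vset_mono st.1 rc.1 rc.2 x y h)
      · intro _
        exact Or.inr (by omega)
    · have hst1 : sweepCell m (m.length : Int) ((m.headD []).length : Int) st rc = st := by
        unfold sweepCell
        rw [if_neg hcond]
      rw [hst1]
      exact ih hbt st hS hsub

-- if a whole pass leaves the flag down, nothing changed and every cell's condition is false
lemma fold_false_all (m : List (List Int)) :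
    ∀ (cells : List (Int × Int)) (v : List (List Bool)),
      (cells.foldl (sweepCell m (m.length : Int) ((m.headD []).length : Int)) (v, false)).2 = false →
      (∀ rc ∈ cells, sweepCell m (m.length : Int) ((m.headD []).length : Int) (v, false) rc = (v, false)) ∧
      cells.foldl (sweepCell m (m.length : Int) ((m.headD []).length : Int)) (v, false) = (v, false) := by
  intro cells
  induction cells with
  | nil => intro v _; exact ⟨by simp, rfl⟩
  | cons rc t ih =>
    intro v h
    simp only [List.foldl_cons] at h ⊢
    by_cases h1 : (sweepCell m (m.length : Int) ((m.headD []).length : Int) (v, false) rc).2 = true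
    · rw [fold_flag_mono m _ _ t _ h1] at h
      exact absurd h (by simp)
    · have he : sweepCell m (m.length : Int) ((m.headD []).length : Int) (v, false) rc = (v, false) :=
        sweepCell_flag_false m _ _ _ _ (by simpa using h1)
      rw [he] at h
      obtain ⟨ha, hb⟩ := ih v h
      refine ⟨?_, by rw [he]; exact hb⟩
      intro x hx
      rcases List.mem_cons.mp hx with hx | hx
      · rw [hx]; exact he
      · exact ha x hx

lemma sweep_eq_cells (m : List (List Int)) (st : List (List Bool) × Bool) :
    sweep m (m.length : Int) ((m.headD []).length : Int) st =
      (cellList m).foldl (sweepCell m (m.length : Int) ((m.headD []).length : Int)) st := by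
  unfold sweep cellList
  rw [nested_foldl_eq]

lemma closed_of_flag_false (m : List (List Int)) (v : List (List Bool))
    (h : (sweep m (m.length : Int) ((m.headD []).length : Int) (v, false)).2 = false) :
    Closed m v := by
  rw [sweep_eq_cells] at h
  obtain ⟨hall, _⟩ := fold_false_all m (cellList m) v h
  intro r c hr0 hr hc0 hc hm hn
  have hmem := mem_cellList m r c hr0 hr hc0 hc
  have := hall (r, c) hmem
  by_contra hv
  have hvf : vget v r c = false := by
    cases hb : vget v r c
    · rfl
    · exact absurd hb hv
  unfold sweepCell at this
  have hcond : (!vget (v, false).1 (r, c).1 (r, c).2 && decide (mget m (r, c).1 (r, c).2 ≠ 0) &&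
      nbr (m.length : Int) ((m.headD []).length : Int) (v, false).1 (r, c).1 (r, c).2) = true := by
    show (!vget v r c && decide (mget m r c ≠ 0) &&
      nbr (m.length : Int) ((m.headD []).length : Int) v r c) = true
    rw [hvf, hn, decide_eq_true hm]
    rfl
  rw [if_pos hcond] at this
  exact absurd (congrArg Prod.snd this) (by simp)

-- the while-loop reaches a closed grid containing the initial marks, inside SReach
lemma loopB_char (m : List (List Int)) :
    ∀ (fuel : Nat) (v : List (List Bool)), Shape m v → MSub m v → ucount v < fuel →
      (∀ x y : Int, vget (initB m) x y = true → vget v x y = true) →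
      Shape m (loopB m (m.length : Int) ((m.headD []).length : Int) fuel v) ∧
      MSub m (loopB m (m.length : Int) ((m.headD []).length : Int) fuel v) ∧
      (∀ x y : Int, vget (initB m) x y = true →
        vget (loopB m (m.length : Int) ((m.headD []).length : Int) fuel v) x y = true) ∧
      Closed m (loopB m (m.length : Int) ((m.headD []).length : Int) fuel v) := by
  intro fuel
  induction fuel with
  | zero => intro v _ _ h; omega
  | succ fuel ih =>
    intro v hS hsub hU hinit
    rw [loopB]
    have hcb := fun rc hrc => cellList_bounds m rc hrc
    have hinv := sweep_fold_inv m (cellList m) hcb (v, false) hS hsub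
    rw [← sweep_eq_cells] at hinv
    obtain ⟨c1, c2, c3, c4, c5⟩ := hinv
    rw [show ((v, false) : List (List Bool) × Bool).1 = v from rfl] at c4 c5
    by_cases hfl : (sweep m (m.length : Int) ((m.headD []).length : Int) (v, false)).2 = true
    · simp only [hfl, if_true]
      rcases c5 hfl with h | h
      · exact absurd h (by simp)
      · exact ih _ c1 c2 (by omega) (fun x y hx => c3 x y (hinit x y hx))
    · have hfl' : (sweep m (m.length : Int) ((m.headD []).length : Int) (v, false)).2 = false := by
        simpa using hfl
      simp only [hfl', if_false, Bool.false_eq_true]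
      have hcl := closed_of_flag_false m v hfl'
      rw [sweep_eq_cells] at hfl'
      obtain ⟨_, heq⟩ := fold_false_all m (cellList m) v hfl'
      rw [← sweep_eq_cells] at heq
      rw [heq]
      exact ⟨hS, hsub, hinit, hcl⟩

-- a closed grid containing the seeds absorbs every Reach0 path
lemma closed_complete (m : List (List Int)) (g : List (List Bool)) (hcl : Closed m g) :
    ∀ {p q x y : Int}, Reach0 m p q x y → vget g p q = true → vget g x y = true := by
  intro p q x y h
  induction h with
  | refl _ _ _ => exact id
  | step p q p' q' x y hg adj hrest ih =>
    intro hv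
    have hgp := (guard0_iff m p q).mp hg
    have hg' := (guard0_iff m p' q').mp (Reach_guard m _ _ _ hrest)
    obtain ⟨a1, a2, a3, a4, a5⟩ := hg'
    have hn := nbr_of_adj g m adj hgp.1 hgp.2.1 hgp.2.2.1 hgp.2.2.2.1 hv
    exact ih (hcl p' q' a1 a2 a3 a4 a5 hn)

-- characterization of B's result: marked ⟺ reachable from a 1-cell
lemma alt_char (m : List (List Int)) :
    Shape m (matrix_dfs_alt m) ∧
      ∀ x y : Int, 0 ≤ x → 0 ≤ y → (vget (matrix_dfs_alt m) x y = true ↔ SReach m x y) := by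
  have hU : ucount (initB m) < m.length * (m.headD []).length + 1 := by
    have := ucount_le_total m (initB m) (initB_shape m)
    omega
  obtain ⟨c1, c2, c3, c4⟩ := loopB_char m (m.length * (m.headD []).length + 1) (initB m)
    (initB_shape m) (initB_sub m) hU (fun _ _ h => h)
  have halt : matrix_dfs_alt m =
      loopB m (m.length : Int) ((m.headD []).length : Int)
        (m.length * (m.headD []).length + 1) (initB m) := rfl
  rw [halt]
  refine ⟨c1, ?_⟩
  intro x y hx hy
  constructor
  · exact c2 x y hx hy
  · rintro ⟨p, q, hm, hr⟩
    have hgp := (guard0_iff m p q).mp (Reach_guard m _ _ _ hr)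
    obtain ⟨a1, a2, a3, a4, _⟩ := hgp
    have hseed : vget (initB m) p q = true := by
      rw [vget_initB m p q a1 a3]
      exact ⟨a2, a4, hm⟩
    exact closed_complete m _ c4 hr (c3 p q hseed)

-- ========= A-side characterization =========

lemma QL_append_single (m : List (List Int)) (L : List (Int × Int)) (rc : Int × Int) (x y : Int) :
    QL m (L ++ [rc]) x y ↔ QL m L x y ∨ (mget m rc.1 rc.2 = 1 ∧ Reach0 m rc.1 rc.2 x y) := by
  unfold QL
  constructor
  · rintro ⟨s, hs, h⟩
    rcases List.mem_append.mp hs with hs | hs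
    · exact Or.inl ⟨s, hs, h⟩
    · rw [List.mem_singleton] at hs
      subst hs
      exact Or.inr h
  · rintro (⟨s, hs, h⟩ | h)
    · exact ⟨s, List.mem_append_left _ hs, h⟩
    · exact ⟨rc, List.mem_append_right _ (by simp), h⟩

lemma foldA_char (m : List (List Int)) :
    ∀ (cells : List (Int × Int)), (∀ rc ∈ cells, 0 ≤ rc.1 ∧ 0 ≤ rc.2) →
    ∀ (v : List (List Bool)) (L : List (Int × Int)), Shape m v →
      (∀ x y : Int, 0 ≤ x → 0 ≤ y → (vget v x y = true ↔ QL m L x y)) →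
      Shape m (cells.foldl (fun v rc =>
          if mget m rc.1 rc.2 == 1 && !vget v rc.1 rc.2 then
            dfsA m (m.length : Int) ((m.headD []).length : Int)
              (m.length * (m.headD []).length + 1) v rc.1 rc.2
          else v) v) ∧
      ∀ x y : Int, 0 ≤ x → 0 ≤ y →
        (vget (cells.foldl (fun v rc =>
            if mget m rc.1 rc.2 == 1 && !vget v rc.1 rc.2 then
              dfsA m (m.length : Int) ((m.headD []).length : Int)
                (m.length * (m.headD []).length + 1) v rc.1 rc.2
            else v) v) x y = true ↔ QL m (L ++ cells) x y) := by
  intro cells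
  induction cells with
  | nil =>
    intro _ v L hS hiff
    simpa using ⟨hS, hiff⟩
  | cons rc t ih =>
    intro hb v L hS hiff
    obtain ⟨hr0, hc0⟩ := hb rc (by simp)
    have hbt := fun x hx => hb x (List.mem_cons_of_mem rc hx)
    simp only [List.foldl_cons]
    have hLrc : L ++ rc :: t = (L ++ [rc]) ++ t := by simp
    by_cases hcond : (mget m rc.1 rc.2 == 1 && !vget v rc.1 rc.2) = true
    · rw [if_pos hcond]
      simp only [Bool.and_eq_true, beq_iff_eq, Bool.not_eq_eq_eq_not, Bool.not_true] at hcond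
      obtain ⟨hm1, hvf⟩ := hcond
      have hU : ucount v < m.length * (m.headD []).length + 1 := by
        have := ucount_le_total m v hS
        omega
      have hch := dfsA_char m (m.length : Int) ((m.headD []).length : Int) rfl rfl
        (m.length * (m.headD []).length + 1) v rc.1 rc.2 hS hU
      have hS1 : Shape m (dfsA m (m.length : Int) ((m.headD []).length : Int)
          (m.length * (m.headD []).length + 1) v rc.1 rc.2) :=
        dfsA_shape m _ _ _ v rc.1 rc.2 hS
      have hiff1 : ∀ x y : Int, 0 ≤ x → 0 ≤ y →
          (vget (dfsA m (m.length : Int) ((m.headD []).length : Int)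
              (m.length * (m.headD []).length + 1) v rc.1 rc.2) x y = true ↔
            QL m (L ++ [rc]) x y) := by
        intro x y hx hy
        rw [hch x y hx hy, QL_append_single]
        have hw : ∀ x y : Int, 0 ≤ x → 0 ≤ y →
            (vget v x y = true ↔ vget (vinitL m) x y = true ∨ QL m L x y) := by
          intro x y hx hy
          rw [hiff x y hx hy, vget_vinit]
          simp
        have hab := Reach_absorb m (m.length : Int) ((m.headD []).length : Int)
          (vinitL m) v (QL m L) (fun p q x y h1 h2 => QL_closed m L h1 h2) hw
          (t := rc.1) (u := rc.2) (x := x) (y := y)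
        rw [hiff x y hx hy]
        constructor
        · rintro (h | h)
          · exact Or.inl h
          · rcases hab.mp (Or.inl h) with h | h
            · exact Or.inr ⟨hm1, h⟩
            · exact Or.inl h
        · rintro (h | ⟨_, h⟩)
          · exact Or.inl h
          · rcases hab.mpr (Or.inl h) with h | h
            · exact Or.inr h
            · exact Or.inl h
      rw [hLrc]
      exact ih hbt _ (L ++ [rc]) hS1 hiff1
    · rw [if_neg hcond]
      simp only [Bool.and_eq_true, beq_iff_eq, Bool.not_eq_eq_eq_not, Bool.not_true, not_and] at hcond
      have hiff1 : ∀ x y : Int, 0 ≤ x → 0 ≤ y →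
          (vget v x y = true ↔ QL m (L ++ [rc]) x y) := by
        intro x y hx hy
        rw [hiff x y hx hy, QL_append_single]
        constructor
        · exact Or.inl
        · rintro (h | ⟨hm1, h⟩)
          · exact h
          · have hvt : vget v rc.1 rc.2 = true := by
              cases hbv : vget v rc.1 rc.2
              · exact absurd (hcond hm1) (by simp [hbv])
              · rfl
            have hQrc : QL m L rc.1 rc.2 := (hiff rc.1 rc.2 hr0 hc0).mp hvt
            exact QL_closed m L hQrc h
      rw [hLrc]
      exact ih hbt v (L ++ [rc]) hS hiff1

lemma QL_cellList_iff (m : List (List Int)) (x y : Int) :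
    QL m (cellList m) x y ↔ SReach m x y := by
  constructor
  · rintro ⟨rc, _, hm, hr⟩
    exact ⟨rc.1, rc.2, hm, hr⟩
  · rintro ⟨p, q, hm, hr⟩
    have hg := (guard0_iff m p q).mp (Reach_guard m _ _ _ hr)
    obtain ⟨a1, a2, a3, a4, _⟩ := hg
    exact ⟨(p, q), mem_cellList m p q a1 a2 a3 a4, hm, hr⟩

lemma a_char (m : List (List Int)) :
    Shape m (matrix_dfs m) ∧
      ∀ x y : Int, 0 ≤ x → 0 ≤ y → (vget (matrix_dfs m) x y = true ↔ SReach m x y) := by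
  have he : matrix_dfs m = (cellList m).foldl (fun v rc =>
      if mget m rc.1 rc.2 == 1 && !vget v rc.1 rc.2 then
        dfsA m (m.length : Int) ((m.headD []).length : Int)
          (m.length * (m.headD []).length + 1) v rc.1 rc.2
      else v) (vinitL m) := by
    unfold matrix_dfs cellList vinitL
    rw [nested_foldl_eq (fun v rc =>
      if mget m rc.1 rc.2 == 1 && !vget v rc.1 rc.2 then
        dfsA m (m.length : Int) ((m.headD []).length : Int)
          (m.length * (m.headD []).length + 1) v rc.1 rc.2
      else v) ((m.headD []).length) (List.range m.length)]
  have hiff0 : ∀ x y : Int, 0 ≤ x → 0 ≤ y →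
      (vget (vinitL m) x y = true ↔ QL m [] x y) := by
    intro x y _ _
    rw [vget_vinit]
    simp [QL]
  obtain ⟨c1, c2⟩ := foldA_char m (cellList m)
    (fun rc hrc => ⟨(cellList_bounds m rc hrc).1, (cellList_bounds m rc hrc).2.2.1⟩)
    (vinitL m) [] (shape_init m) hiff0
  rw [he]
  refine ⟨c1, ?_⟩
  intro x y hx hy
  rw [c2 x y hx hy]
  simp only [List.nil_append]
  exact QL_cellList_iff m x y

-- ===== VERDICT (by name: the statement is the Claim_ definition above) =====
theorem matrix_dfs_spec : Claim_equal_matrix_dfs := by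
  intro matrix _ _
  unfold Spec_matrix_dfs
  obtain ⟨hSa, hca⟩ := a_char matrix
  obtain ⟨hSb, hcb⟩ := alt_char matrix
  apply grid_eq
  · rw [hSa.1, hSb.1]
  · intro i h1 h2
    rw [hSa.2 _ (List.getElem_mem h1), hSb.2 _ (List.getElem_mem h2)]
  · intro i j
    rw [Bool.eq_iff_iff, hca (i : Int) (j : Int) (Int.natCast_nonneg i) (Int.natCast_nonneg j),
      hcb (i : Int) (j : Int) (Int.natCast_nonneg i) (Int.natCast_nonneg j)]
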